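-- pv_equiv track=rewrite | github.com/letmeloveyou82/Algorithm | Python/Programmers/해시/대충 만든 자판.py | solution
-- ===== SOURCE A (Python) =====
-- def solution(keymap, targets):
--     answer = []
--     char_dict = dict()
--
--     # 목표 문자열 작성을 위해 최소 눌러야 하는 키 횟수 구하는 함수
--     def find_target_cnt(target):
--         ans = 0
--         for t in target:
--             find_char = char_dict.get(t)
--             if find_char == None:
--                 return -1 # 작성 불가일 때는 -1 리턴
--             else:
--                 ans += find_char
--         return ans
--
--     for k in keymap:
--         for i in range(len(k)):
--             previous = char_dict.get(k[i])
--             if previous == None: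
--                 # 추가
--                 char_dict[k[i]] = i+1
--             else:
--                 # 최소 값으로 value 수정
--                 char_dict[k[i]] = min(previous, i+1)
--
--
--     for target in targets:
--         answer.append(find_target_cnt(target))
--
--     return answer
-- ===== SOURCE B (Python) =====
-- def solution(keymap, targets):
--     answer = []
--     for target in targets:
--         total = 0
--         for c in target:
--             best = -1
--             for k in keymap:
--                 p = k.find(c)
--                 if p != -1 and (best == -1 or p < best):
--                     best = p
--             if best == -1:
--                 total = -1
--                 break
--             total += best + 1
--         answer.append(total)
--     return answer
-- ===== Notes on version B (the rewrite author's own statement) =====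
-- stated objective: alternative
-- what changed: Drops A's precomputed char->min-presses dict entirely: B answers each target character on the fly by scanning every keymap string with str.find for the minimal first-occurrence index, bailing out with -1 as soon as a character is unreachable.
import Mathlib
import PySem

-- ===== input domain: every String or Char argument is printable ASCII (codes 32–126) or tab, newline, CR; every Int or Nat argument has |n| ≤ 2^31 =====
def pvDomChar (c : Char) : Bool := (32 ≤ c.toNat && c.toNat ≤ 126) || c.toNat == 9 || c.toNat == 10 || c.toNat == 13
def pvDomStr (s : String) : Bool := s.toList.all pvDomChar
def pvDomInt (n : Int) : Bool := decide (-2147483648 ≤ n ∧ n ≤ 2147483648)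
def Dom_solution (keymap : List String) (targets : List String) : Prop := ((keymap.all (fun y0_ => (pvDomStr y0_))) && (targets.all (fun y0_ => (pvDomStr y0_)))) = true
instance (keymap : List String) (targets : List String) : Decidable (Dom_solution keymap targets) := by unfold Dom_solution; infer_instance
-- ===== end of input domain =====

-- B drops A's precomputed dict and scans the keymap with str.find per target character; alternative decomposition, return value identical.

-- ===== PORT A =====
-- inner loop 'for i in range(len(k)):' over k, i is the running index
def buildDictLoop (d : PySem.Dict Char Int) (i : Int) : List Char → PySem.Dict Char Int
  | [] => d
  | c :: rest =>
    buildDictLoop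
      (match d.get? c with
        | none => d.insert c (i + 1)
        | some p => d.insert c (min p (i + 1)))
      (i + 1) rest

-- A's nested helper find_target_cnt, with the running sum 'ans'
def findTargetCnt (d : PySem.Dict Char Int) : List Char → Int → Int
  | [], ans => ans
  | c :: rest, ans =>
    match d.get? c with
    | none => -1
    | some v => findTargetCnt d rest (ans + v)

def solution (keymap : List String) (targets : List String) : List Int :=
  let charDict := keymap.foldl (fun d k => buildDictLoop d 0 k.toList) PySem.Dict.empty
  targets.map (fun t => findTargetCnt charDict t.toList 0)

-- ===== PORT B =====
-- inner scan 'for k in keymap: p = k.find(c); …' tracking the smallest found index in 'best'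
def minFindLoop (c : Char) (best : Int) : List String → Int
  | [] => best
  | k :: rest =>
    let p := PySem.Str.find k (String.ofList [c])
    let best' := if p ≠ -1 ∧ (best = -1 ∨ p < best) then p else best
    minFindLoop c best' rest

-- per-target loop with the running 'total' and the break-to--1
def altCostLoop (keymap : List String) : List Char → Int → Int
  | [], total => total
  | c :: rest, total =>
    let best := minFindLoop c (-1) keymap
    if best = -1 then -1 else altCostLoop keymap rest (total + best + 1)

def solution_alt (keymap : List String) (targets : List String) : List Int :=
  targets.map (fun t => altCostLoop keymap t.toList 0)

-- ===== PRECONDITION & SPEC =====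
def Spec_solution (keymap : List String) (targets : List String) (out : List Int) : Prop := out = solution_alt keymap targets
instance (keymap : List String) (targets : List String) (out : List Int) : Decidable (Spec_solution keymap targets out) := by unfold Spec_solution; infer_instance

-- ===== CLAIM (what is proved, stated in full; the proofs are below) =====
def Claim_equal_solution : Prop := ∀ (keymap : List String) (targets : List String), Dom_solution keymap targets → Spec_solution keymap targets (solution keymap targets)

-- ===== LEMMAS AND PROOFS =====

-- index of the first occurrence of c in a char list
def firstIdx (c : Char) : List Char → Option Nat
  | [] => none
  | x :: rest => if x = c then some 0 else (firstIdx c rest).map (· + 1)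

-- how one keymap string folds into A's dict value for a given char
def combine (acc : Option Int) (fi : Option Nat) : Option Int :=
  match acc, fi with
  | none, none => none
  | some p, none => some p
  | none, some m => some ((m : Int) + 1)
  | some p, some m => some (min p ((m : Int) + 1))

theorem firstIdx_eq_none_iff (c : Char) (l : List Char) : firstIdx c l = none ↔ c ∉ l := by
  induction l with
  | nil => simp [firstIdx]
  | cons x rest ih =>
    by_cases h : x = c
    · subst h; simp [firstIdx]
    · have h' : c ≠ x := fun hc => h hc.symm
      simp [firstIdx, h, h', Option.map_eq_none_iff, ih]

theorem firstIdx_eq_some (c : Char) (l : List Char) (n : Nat) (h : firstIdx c l = some n) :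
    l[n]? = some c ∧ ∀ i < n, l[i]? ≠ some c := by
  induction l generalizing n with
  | nil => simp [firstIdx] at h
  | cons x rest ih =>
    by_cases hx : x = c
    · simp [firstIdx, hx] at h
      subst h; subst hx; simp
    · simp [firstIdx, hx, Option.map_eq_some_iff] at h
      obtain ⟨m, hm, rfl⟩ := h
      obtain ⟨h1, h2⟩ := ih m hm
      refine ⟨by simpa using h1, ?_⟩
      intro i hi
      cases i with
      | zero => simpa using hx
      | succ j => simpa using h2 j (by omega)

theorem singleton_infix_iff (c : Char) (l : List Char) : [c] <:+: l ↔ c ∈ l := by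
  constructor
  · intro h; exact h.subset (by simp)
  · intro h
    obtain ⟨s, t, rfl⟩ := List.append_of_mem h
    exact ⟨s, t, by simp⟩

theorem prefix_single_drop (c : Char) (l : List Char) (j : Nat) :
    [c] <+: l.drop j ↔ l[j]? = some c := by
  rw [← List.head?_drop]
  cases hd : l.drop j with
  | nil => simp
  | cons y ys =>
    simp only [List.cons_prefix_cons, List.head?_cons, List.nil_prefix, and_true]
    constructor
    · rintro rfl; rfl
    · intro h; exact (Option.some.inj h).symm


theorem find_single (c : Char) (l : List Char) :
    PySem.Chars.find l [c] = (firstIdx c l).elim (-1) (fun n => (n : Int)) := by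
  cases h : firstIdx c l with
  | none =>
    have : c ∉ l := (firstIdx_eq_none_iff c l).mp h
    simpa using (PySem.Chars.find_eq_neg_one_iff l [c]).mpr
      (fun hin => this ((singleton_infix_iff c l).mp hin))
  | some n =>
    obtain ⟨h1, h2⟩ := firstIdx_eq_some c l n h
    have hmem : c ∈ l := by
      have := List.getElem?_eq_some_iff.mp h1
      obtain ⟨hlt, he⟩ := this
      exact he ▸ List.getElem_mem hlt
    have hpos : 0 ≤ PySem.Chars.find l [c] := by
      rw [PySem.Chars.find_nonneg_iff]
      exact (singleton_infix_iff c l).mpr hmem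
    obtain ⟨hs1, hs2⟩ := PySem.Chars.find_spec hpos
    set m := (PySem.Chars.find l [c]).toNat with hm
    have hmc : l[m]? = some c := (prefix_single_drop c l m).mp hs1
    have : n = m := by
      rcases lt_trichotomy n m with hlt | heq | hgt
      · exact absurd ((prefix_single_drop c l n).mpr h1) (hs2 n hlt)
      · exact heq
      · exact absurd hmc (h2 m hgt)
    subst this
    simp only [Option.elim]
    omega

theorem buildDictLoop_get (l : List Char) (d : PySem.Dict Char Int) (s : Nat) (c : Char) :
    (buildDictLoop d (s : Int) l).get? c
      = combine (d.get? c) ((firstIdx c l).map (fun m => s + m)) := by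
  induction l generalizing d s with
  | nil => cases h : d.get? c <;> simp [buildDictLoop, combine, firstIdx, h]
  | cons x rest ih =>
    have hcast : (s : Int) + 1 = ((s + 1 : Nat) : Int) := by push_cast; ring
    by_cases hx : x = c
    · cases hd : d.get? c with
      | none =>
        simp only [buildDictLoop, hx, hd, hcast]
        rw [ih, PySem.Dict.get?_insert_self]
        cases hr : firstIdx c rest with
        | none => simp [firstIdx, combine]
        | some m =>
          simp only [firstIdx, combine, hr, Option.map_some]
          congr 1
          push_cast; omega
      | some p =>
        simp only [buildDictLoop, hx, hd, hcast]
        rw [ih, PySem.Dict.get?_insert_self]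
        cases hr : firstIdx c rest with
        | none => simp [firstIdx, combine]
        | some m =>
          simp only [firstIdx, combine, hr, Option.map_some]
          congr 1
          push_cast; omega
    · have hget : ∀ v, (d.insert x v).get? c = d.get? c := fun v =>
        PySem.Dict.get?_insert_of_ne d v (fun h => hx h.symm)
      cases hd : d.get? x with
      | none =>
        simp only [buildDictLoop, hd, hcast]
        rw [ih, hget]
        cases hr : firstIdx c rest with
        | none => simp [firstIdx, hx, combine, hr]
        | some m =>
          simp only [firstIdx, if_neg hx, hr, Option.map_some]
          cases hc : d.get? c <;> · simp only [combine]; congr 2; omega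
      | some p =>
        simp only [buildDictLoop, hd, hcast]
        rw [ih, hget]
        cases hr : firstIdx c rest with
        | none => simp [firstIdx, hx, combine, hr]
        | some m =>
          simp only [firstIdx, if_neg hx, hr, Option.map_some]
          cases hc : d.get? c <;> · simp only [combine]; congr 2; omega

theorem buildAll_get (keymap : List String) (d : PySem.Dict Char Int) (c : Char) :
    (keymap.foldl (fun d k => buildDictLoop d 0 k.toList) d).get? c
      = keymap.foldl (fun acc k => combine acc (firstIdx c k.toList)) (d.get? c) := by
  induction keymap generalizing d with
  | nil => rfl
  | cons k rest ih =>
    simp only [List.foldl_cons]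
    rw [ih]
    have := buildDictLoop_get k.toList d 0 c
    simp only [Nat.cast_zero, Nat.zero_add, Option.map_id'] at this
    rw [this]

theorem minFind_eq (keymap : List String) (c : Char) (acc : Option Int) (best : Int)
    (h : acc = if best = -1 then none else some (best + 1)) (hb : -1 ≤ best) :
    keymap.foldl (fun acc k => combine acc (firstIdx c k.toList)) acc
      = (if minFindLoop c best keymap = -1 then none
         else some (minFindLoop c best keymap + 1)) := by
  induction keymap generalizing acc best with
  | nil => simpa [minFindLoop] using h
  | cons k rest ih =>
    simp only [List.foldl_cons, minFindLoop]
    have hfind : PySem.Str.find k (String.ofList [c])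
        = (firstIdx c k.toList).elim (-1) (fun n => (n : Int)) := by
      have := find_single c k.toList
      simpa using this
    cases hr : firstIdx c k.toList with
    | none =>
      rw [hfind, hr]
      simp only [Option.elim]
      have hcond : ¬ ((-1 : Int) ≠ -1 ∧ ((best = -1 ∨ (-1:Int) < best))) := by tauto
      rw [if_neg hcond]
      have hnone : combine acc none = acc := by cases acc <;> rfl
      rw [hnone]
      exact ih acc best h hb
    | some m =>
      rw [hfind, hr]
      simp only [Option.elim]
      by_cases hbest : best = -1
      · subst hbest
        have hcond : ((m : Int) ≠ -1 ∧ (((-1:Int) = -1 ∨ (m:Int) < -1))) := by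
          constructor; · omega
          · left; rfl
        rw [if_pos hcond]
        have hacc : combine acc (some m) = some ((m : Int) + 1) := by
          simp [h, combine]
        rw [hacc]
        exact ih _ m (by simp) (by omega)
      · have hp : acc = some (best + 1) := by simp [h, hbest]
        by_cases hlt : (m : Int) < best
        · have hcond : ((m : Int) ≠ -1 ∧ ((best = -1 ∨ (m:Int) < best))) := by
            constructor; · omega
            · right; exact hlt
          rw [if_pos hcond]
          have hacc : combine acc (some m) = some ((m : Int) + 1) := by
            simp [hp, combine]
            omega
          rw [hacc]
          exact ih _ m (by simp) (by omega)
        · have hcond : ¬ ((m : Int) ≠ -1 ∧ ((best = -1 ∨ (m:Int) < best))) := by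
            intro ⟨_, h2⟩; rcases h2 with h2 | h2
            · exact hbest h2
            · exact hlt h2
          rw [if_neg hcond]
          have hacc : combine acc (some m) = some (best + 1) := by
            simp [hp, combine]
            omega
          rw [hacc]
          exact ih _ best (by simp [hbest]) hb

theorem target_eq (keymap : List String) (D : PySem.Dict Char Int)
    (hD : ∀ c, D.get? c = (if minFindLoop c (-1) keymap = -1 then none
                           else some (minFindLoop c (-1) keymap + 1)))
    (l : List Char) (acc : Int) :
    findTargetCnt D l acc = altCostLoop keymap l acc := by
  induction l generalizing acc with
  | nil => rfl
  | cons c rest ih =>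
    simp only [findTargetCnt, altCostLoop, hD c]
    by_cases hr : minFindLoop c (-1) keymap = -1
    · simp [hr]
    · simp only [if_neg hr]
      rw [ih]
      congr 1
      ring

-- ===== VERDICT (by name: the statement is the Claim_ definition above) =====
theorem solution_spec : Claim_equal_solution := by
  intro keymap targets _
  unfold Spec_solution solution solution_alt
  simp only
  apply List.map_congr_left
  intro t _
  apply target_eq
  intro c
  rw [buildAll_get]
  have hempty : (PySem.Dict.empty : PySem.Dict Char Int).get? c = none := by
    simp [PySem.Dict.get?_empty]
  rw [hempty]
  exact minFind_eq keymap c none (-1) (by simp) (by omega)
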